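-- pv_equiv track=rewrite | github.com/s2lee/PS | BOJ/Binary Search/2512.py | solution
-- ===== SOURCE A (Python) =====
-- def solution(data, n, m):
--     if sum(data) <= m:
--         return max(data)
--
--     start = 0
--     end = data[n - 1]
--     ans = 0
--     while start <= end:
--         mid = (start + end) // 2
--         temp = 0
--         for i in data:
--             if i < mid:
--                 temp += i
--             else:
--                 temp += mid
--
--         if temp > m:
--             end = mid - 1
--         else:
--             start = mid + 1
--             ans = max(ans, mid)
--
--     return ans
-- ===== SOURCE B (Python) =====
-- def _bisect_left(a, x):
--     lo, hi = 0, len(a)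
--     while lo < hi:
--         mid = (lo + hi) // 2
--         if a[mid] < x:
--             lo = mid + 1
--         else:
--             hi = mid
--     return lo
--
--
-- def solution(data, n, m):
--     if sum(data) <= m:
--         return max(data)
--
--     srt = sorted(data)
--     prefix = [0]
--     acc = 0
--     for x in srt:
--         acc += x
--         prefix.append(acc)
--     ln = len(srt)
--
--     lo, hi = 0, data[n - 1]
--     best = 0
--     while lo <= hi:
--         t = (lo + hi) // 2
--         k = _bisect_left(srt, t)
--         capped = prefix[k] + (ln - k) * t
--         if capped > m:
--             hi = t - 1
--         else:
--             lo = t + 1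
--             if t > best:
--                 best = t
--     return best
-- ===== Notes on version B (the rewrite author's own statement) =====
-- stated objective: alternative
-- what changed: Replaces the O(n) clamped-sum scan inside every binary-search step by a one-time sort + prefix-sum table queried with a hand-written bisect_left, so each step costs O(log n); intended as faster (measured 1.62x median at the largest size but not consistent across inputs).
import Mathlib
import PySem

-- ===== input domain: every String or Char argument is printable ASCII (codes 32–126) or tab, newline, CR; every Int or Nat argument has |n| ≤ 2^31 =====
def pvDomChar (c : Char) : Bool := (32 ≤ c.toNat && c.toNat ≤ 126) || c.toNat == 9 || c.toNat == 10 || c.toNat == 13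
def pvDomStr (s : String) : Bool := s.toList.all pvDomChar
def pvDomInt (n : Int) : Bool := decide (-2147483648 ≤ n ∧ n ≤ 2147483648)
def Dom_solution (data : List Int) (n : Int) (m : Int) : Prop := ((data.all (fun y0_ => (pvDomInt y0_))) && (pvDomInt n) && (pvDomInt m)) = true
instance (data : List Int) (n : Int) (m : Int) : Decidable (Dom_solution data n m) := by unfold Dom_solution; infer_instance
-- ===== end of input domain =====

-- B replaces the per-step O(n) clamped-sum scan by a one-time sort + prefix-sum table queried with bisect (objective: alternative algorithm).

-- ===== PORT A =====
-- A's inner 'for i in data' clamped sum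
def pvClampA (data : List Int) (mid : Int) : Int :=
  data.foldl (fun temp i => if i < mid then temp + i else temp + mid) 0

-- A's while loop
def pvLoopA (data : List Int) (m : Int) (start end_ ans : Int) : Int :=
  if _h : start ≤ end_ then
    let mid := PySem.Int.floordiv (start + end_) 2
    if pvClampA data mid > m then
      pvLoopA data m start (mid - 1) ans
    else
      pvLoopA data m (mid + 1) end_ (max ans mid)
  else ans
termination_by (end_ - start + 1).toNat
decreasing_by
  · have := PySem.Int.floordiv_two_mid_bounds _h; omega
  · have := PySem.Int.floordiv_two_mid_bounds _h; omega

def solution (data : List Int) (n : Int) (m : Int) : Int :=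
  if data.sum ≤ m then (PySem.List.max? data id).getD 0  -- max(data); default unreachable under Pre_ (data ≠ [])
  else
    match PySem.List.pyGet? data (n - 1) with            -- data[n - 1]
    | some e => pvLoopA data m 0 e 0
    | none => 0                                          -- IndexError; excluded by Pre_

-- ===== PORT B =====
-- Source B's prefix-sum table: prefix = [0]; acc = 0; for x in srt: acc += x; prefix.append(acc)
def pvPrefix (srt : List Int) : List Int :=
  (srt.foldl (fun (p : List Int × Int) x => (p.1 ++ [p.2 + x], p.2 + x)) ([0], 0)).1

-- Source B's per-step evaluation: k = _bisect_left(srt, t); prefix[k] + (ln - k) * t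
-- (_bisect_left in Source B is exactly the standard binary search; ported as the prelude's bisectLeft)
def pvClampB (srt pref : List Int) (ln t : Int) : Int :=
  PySem.List.pyGetD pref ((PySem.List.bisectLeft srt t : Nat) : Int) 0
    + (ln - (PySem.List.bisectLeft srt t : Nat)) * t

-- Source B's while loop
def pvLoopB (srt pref : List Int) (ln m : Int) (lo hi best : Int) : Int :=
  if _h : lo ≤ hi then
    let t := PySem.Int.floordiv (lo + hi) 2
    if pvClampB srt pref ln t > m then
      pvLoopB srt pref ln m lo (t - 1) best
    else
      pvLoopB srt pref ln m (t + 1) hi (if t > best then t else best)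
  else best
termination_by (hi - lo + 1).toNat
decreasing_by
  · have := PySem.Int.floordiv_two_mid_bounds _h; omega
  · have := PySem.Int.floordiv_two_mid_bounds _h; omega

def solution_alt (data : List Int) (n : Int) (m : Int) : Int :=
  if data.sum ≤ m then (PySem.List.max? data id).getD 0  -- max(data); default unreachable under Pre_ (data ≠ [])
  else
    match PySem.List.pyGet? data (n - 1) with            -- data[n - 1]
    | some e =>
      let srt := PySem.List.sorted data id
      pvLoopB srt (pvPrefix srt) (srt.length : Int) m 0 e 0
    | none => 0                                          -- IndexError; excluded by Pre_

-- ===== PRECONDITION & SPEC =====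
-- Pre_ excludes exactly the inputs where A raises: empty data (max of empty list is a
-- ValueError) and, when sum(data) > m, an index n-1 out of range (IndexError on data[n-1]).
def Pre_solution (data : List Int) (n : Int) (m : Int) : Prop :=
  data ≠ [] ∧ (data.sum ≤ m ∨ PySem.Raise.InRange data.length (n - 1))
instance (data : List Int) (n : Int) (m : Int) : Decidable (Pre_solution data n m) := by
  unfold Pre_solution; infer_instance

def pvWitness_solution : List Int × Int × Int := ([1, 2, 3], 3, 2)

def Spec_solution (data : List Int) (n : Int) (m : Int) (out : Int) : Prop := out = solution_alt data n m
instance (data : List Int) (n : Int) (m : Int) (out : Int) : Decidable (Spec_solution data n m out) := by unfold Spec_solution; infer_instance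

-- ===== CLAIM (what is proved, stated in full; the proofs are below) =====
def Claim_equal_solution : Prop := ∀ (data : List Int) (n : Int) (m : Int), Dom_solution data n m → Pre_solution data n m → Spec_solution data n m (solution data n m)

-- ===== LEMMAS AND PROOFS =====

-- A's scan computes the sum of min(x, t)
theorem pvClampA_eq_sum (data : List Int) (t : Int) :
    pvClampA data t = (data.map (fun x => min x t)).sum := by
  unfold pvClampA
  have h : ∀ (l : List Int) (init : Int),
      l.foldl (fun temp i => if i < t then temp + i else temp + t) init
        = init + (l.map (fun x => min x t)).sum := by
    intro l
    induction l with
    | nil => simp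
    | cons x xs ih =>
      intro init
      simp only [List.foldl_cons, List.map_cons, List.sum_cons, ih]
      split <;> omega
  simpa using h data 0

-- partial sums helper (proof-only)
def pvPsums (a : Int) : List Int → List Int
  | [] => []
  | x :: xs => (a + x) :: pvPsums (a + x) xs

theorem pvPrefix_foldl (s : List Int) : ∀ (acc : List Int) (a : Int),
    (s.foldl (fun (p : List Int × Int) x => (p.1 ++ [p.2 + x], p.2 + x)) (acc ++ [a], a)).1
      = acc ++ a :: pvPsums a s := by
  induction s with
  | nil => intro acc a; simp [pvPsums]
  | cons x xs ih =>
    intro acc a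
    simp only [List.foldl_cons, pvPsums]
    have := ih (acc ++ [a]) (a + x)
    simpa using this

theorem pvPsums_getD (s : List Int) : ∀ (k : Nat) (a : Int), k ≤ s.length →
    (a :: pvPsums a s).getD k 0 = a + (s.take k).sum := by
  induction s with
  | nil =>
    intro k a hk
    have hk0 : k = 0 := by simpa using hk
    subst hk0; simp [pvPsums]
  | cons x xs ih =>
    intro k a hk
    cases k with
    | zero => simp
    | succ k =>
      simp only [pvPsums, List.getD_cons_succ, List.take_succ_cons, List.sum_cons]
      have := ih k (a + x) (by simpa using hk)
      rw [this]; ring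

theorem pvPrefix_getD (s : List Int) (k : Nat) (hk : k ≤ s.length) :
    (pvPrefix s).getD k 0 = (s.take k).sum := by
  unfold pvPrefix
  have h := pvPrefix_foldl s [] 0
  simp only [List.nil_append] at h
  rw [h]
  have := pvPsums_getD s k 0 hk
  simpa using this

-- sorted split at bisectLeft: clamped sum in closed form
theorem pvClampSplit (s : List Int) (hs : s.Pairwise (· ≤ ·)) (t : Int) :
    (s.take (PySem.List.bisectLeft s t)).sum
      + ((s.length : Int) - (PySem.List.bisectLeft s t : Nat)) * t
      = (s.map (fun x => min x t)).sum := by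
  obtain ⟨hk, hlt, hge⟩ := PySem.List.bisectLeft_spec s t hs
  set k := PySem.List.bisectLeft s t with hkdef
  have h1 : (s.take k).map (fun x => min x t) = (s.take k).map id := by
    apply List.map_congr_left
    intro x hx
    rw [List.mem_iff_getElem] at hx
    obtain ⟨j, hj, hxe⟩ := hx
    have hj' : j < s.length := by
      have := List.length_take (l := s) (i := k); omega
    have : (s.take k)[j] = s[j] := List.getElem_take
    have hjk : j < k := by
      have := List.length_take (l := s) (i := k); omega
    have hlt' := hlt j hj' hjk
    simp only [id]
    omega
  have h2 : (s.drop k).map (fun x => min x t) = (s.drop k).map (fun _ => t) := by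
    apply List.map_congr_left
    intro x hx
    rw [List.mem_iff_getElem] at hx
    obtain ⟨j, hj, hxe⟩ := hx
    have hj' : k + j < s.length := by
      have := List.length_drop (l := s) (i := k); omega
    have : (s.drop k)[j] = s[k + j] := by
      rw [List.getElem_drop]
    have hge' := hge (k + j) hj' (by omega)
    omega
  conv_rhs => rw [← List.take_append_drop k s, List.map_append, List.sum_append]
  rw [h1, h2, List.map_id]
  have hlen : (s.drop k).length = s.length - k := List.length_drop
  have hconst : ((s.drop k).map (fun _ => t)).sum = ((s.length - k : Nat) : Int) * t := by
    rw [List.map_const', List.sum_replicate, hlen]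
    simp
  rw [hconst]
  have : ((s.length - k : Nat) : Int) = (s.length : Int) - (k : Nat) := by
    omega
  rw [this]

-- B's per-step evaluation equals A's scan
theorem pvClampB_eq_pvClampA (data : List Int) (t : Int) :
    pvClampB (PySem.List.sorted data id) (pvPrefix (PySem.List.sorted data id))
      ((PySem.List.sorted data id).length : Int) t = pvClampA data t := by
  set s := PySem.List.sorted data id with hs
  have hpw : s.Pairwise (· ≤ ·) := by
    have := PySem.List.sorted_pairwise (xs := data) (key := id)
    simpa [hs] using this
  obtain ⟨hk, -, -⟩ := PySem.List.bisectLeft_spec s t hpw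
  unfold pvClampB
  rw [PySem.List.pyGetD_natCast, pvPrefix_getD s _ hk]
  rw [pvClampSplit s hpw t, pvClampA_eq_sum]
  have hperm : (s.map (fun x => min x t)).Perm (data.map (fun x => min x t)) :=
    (PySem.List.sorted_perm data id false).map _
  exact hperm.sum_eq

-- identical binary-search skeletons with equal step evaluations agree
theorem pvLoop_eq (data srt pref : List Int) (ln m : Int)
    (h : ∀ t, pvClampB srt pref ln t = pvClampA data t) :
    ∀ (N : Nat) (lo hi best : Int), (hi - lo + 1).toNat ≤ N →
      pvLoopB srt pref ln m lo hi best = pvLoopA data m lo hi best := by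
  intro N
  induction N with
  | zero =>
    intro lo hi best hN
    rw [pvLoopB, pvLoopA]
    have : ¬ lo ≤ hi := by omega
    simp [this]
  | succ N ih =>
    intro lo hi best hN
    rw [pvLoopB, pvLoopA]
    by_cases hle : lo ≤ hi
    · simp only [hle, dif_pos]
      have hmid := PySem.Int.floordiv_two_mid_bounds hle
      rw [h]
      by_cases hc : pvClampA data (PySem.Int.floordiv (lo + hi) 2) > m
      · simp only [hc, if_pos]
        exact ih lo _ best (by omega)
      · simp only [hc, if_neg, not_false_iff]
        have hacc : (if PySem.Int.floordiv (lo + hi) 2 > best then PySem.Int.floordiv (lo + hi) 2 else best)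
            = max best (PySem.Int.floordiv (lo + hi) 2) := by
          split <;> omega
        rw [hacc]
        exact ih _ hi _ (by omega)
    · simp [hle]

-- ===== VERDICT (by name: the statement is the Claim_ definition above) =====
theorem solution_spec : Claim_equal_solution := by
  intro data n m _hdom _hpre
  unfold Spec_solution solution solution_alt
  by_cases hsum : data.sum ≤ m
  · simp [hsum]
  · simp only [hsum, if_neg, not_false_iff]
    cases hget : PySem.List.pyGet? data (n - 1) with
    | none => rfl
    | some e =>
      exact (pvLoop_eq data _ _ _ m (pvClampB_eq_pvClampA data) ((e - 0 + 1).toNat) 0 e 0 le_rfl).symm
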